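-- pv_equiv track=rewrite | github.com/edt-yxz-zzd/python3_src | nn_ns/Trie/see seed.algo.search_prefixes/get_may_longest_prefix_idx_in_sorted_prefixes.py | get_may_longest_prefix_idx_in_sorted_prefixes
-- ===== SOURCE A (Python) =====
-- from bisect import bisect_right
--
-- def get_may_longest_prefix_idx_in_sorted_prefixes(s, sorted_prefixes):
--     '''String -> sorted[String] -> (None|UInt)
--
-- inefficient
-- O(N)
-- consider to use Trie
--
-- example:
--     >>> this = get_may_longest_prefix_idx_in_sorted_prefixes
--     >>> sorted_prefixes = ["1", "2", "23", "234", "5"]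
--     >>> this("", sorted_prefixes) is None
--     True
--     >>> this("3", sorted_prefixes) is None
--     True
--     >>> this("6", sorted_prefixes) is None
--     True
--     >>> this("1", sorted_prefixes)
--     0
--     >>> this("2", sorted_prefixes)
--     1
--     >>> this("22", sorted_prefixes)
--     1
--     >>> this("23", sorted_prefixes)
--     2
--     >>> this("24", sorted_prefixes)
--     1
--     >>> this('2', ['', '1'])
--     0
--
-- bug of version1:
--     def get_may_longest_prefix_idx_in_sorted_prefixes(s, sorted_prefixes):
--         insert_point = bisect_right(sorted_prefixes, s)
--         if insert_point and s.startswith(sorted_prefixes[insert_point-1]):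
--             return insert_point-1
--         return None
--     fail at:
--         get_may_longest_prefix_idx_in_sorted_prefixes('2', ['', '1'])
--
-- '''
--     #raise NotImplementedError
--     insert_point = bisect_right(sorted_prefixes, s)
--     while insert_point:
--         # assert sorted_prefixes
--
--         insert_point -= 1
--         prefix = sorted_prefixes[insert_point]
--         if s.startswith(prefix):
--             return insert_point
--
--         # assert s
--         if s[0] != prefix[0]:
--             if not sorted_prefixes[0]:
--                 return 0
--             break
--     return None
-- ===== SOURCE B (Python) =====
-- def get_may_longest_prefix_idx_in_sorted_prefixes(s, sorted_prefixes):
--     best = None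
--     best_len = -1
--     for i, p in enumerate(sorted_prefixes):
--         if s.startswith(p) and len(p) >= best_len:
--             best = i
--             best_len = len(p)
--     return best
-- ===== Notes on version B (the rewrite author's own statement) =====
-- stated objective: simpler
-- what changed: A bisects for the insertion point of s and walks backward with an early break on first-character mismatch plus an empty-prefix special case; B is one plain forward pass that keeps the index of the last longest matching prefix seen so far (no bisect, no break logic).
-- outside the precondition, e.g. on get_may_longest_prefix_idx_in_sorted_prefixes('b', ['b', 'a']): A returns None, B returns 0; on get_may_longest_prefix_idx_in_sorted_prefixes('a', ['', '', '1']): A returns 0, B returns 1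
import Mathlib
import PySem

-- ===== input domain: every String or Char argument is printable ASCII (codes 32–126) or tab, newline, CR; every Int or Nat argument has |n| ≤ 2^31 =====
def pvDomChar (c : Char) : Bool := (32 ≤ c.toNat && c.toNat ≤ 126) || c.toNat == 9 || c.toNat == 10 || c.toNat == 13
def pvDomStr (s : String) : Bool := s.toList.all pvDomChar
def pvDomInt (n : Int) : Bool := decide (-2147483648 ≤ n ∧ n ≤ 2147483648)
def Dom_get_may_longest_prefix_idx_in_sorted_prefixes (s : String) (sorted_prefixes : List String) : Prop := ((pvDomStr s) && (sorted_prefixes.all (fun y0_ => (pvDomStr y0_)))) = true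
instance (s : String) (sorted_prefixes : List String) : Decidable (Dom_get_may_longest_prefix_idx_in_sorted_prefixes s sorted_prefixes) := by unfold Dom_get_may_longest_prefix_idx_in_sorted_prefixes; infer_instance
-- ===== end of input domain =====

-- B replaces A's bisect + backward scan with early break by one plain forward pass that keeps the
-- index of the longest matching prefix seen so far (objective: simpler; no speed claim).

-- ===== PORT A =====
-- the 'while insert_point:' loop of A, recursing on the decremented insert_point;
-- sorted_prefixes[insert_point] / sorted_prefixes[0] are ported as getD (every reached index is in
-- range: insert_point < bisect_right ≤ len, and the list is nonempty once the loop is entered);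
-- s[0] / prefix[0] are ported as pyGet? (both are nonempty where Python evaluates them)
def pvLoopA (s : String) (lst : List String) : Nat → Option Int
  | 0 => none                                   -- loop exhausted: return None
  | i + 1 =>
    let prefix_ := lst.getD i ""                -- insert_point -= 1; prefix = sorted_prefixes[insert_point]
    if PySem.Str.startswith s prefix_ then some (i : Int)
    else if PySem.Str.pyGet? s 0 ≠ PySem.Str.pyGet? prefix_ 0 then
      (if lst.getD 0 "" = "" then some 0 else none)   -- 'if not sorted_prefixes[0]: return 0' / break → return None
    else pvLoopA s lst i

def get_may_longest_prefix_idx_in_sorted_prefixes (s : String) (sorted_prefixes : List String) : Option Int :=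
  pvLoopA s sorted_prefixes (PySem.List.bisectRight sorted_prefixes s)

-- ===== PORT B =====
-- Source B: one forward pass over enumerate(sorted_prefixes), state (best, best_len), starting (None, -1)
def get_may_longest_prefix_idx_in_sorted_prefixes_alt (s : String) (sorted_prefixes : List String) : Option Int :=
  ((PySem.List.enumerate sorted_prefixes 0).foldl
    (fun (st : Option Int × Int) ip =>
      if PySem.Str.startswith s ip.2 = true ∧ st.2 ≤ PySem.Str.len ip.2 then (some ip.1, PySem.Str.len ip.2) else st)
    (none, -1)).1

-- ===== PRECONDITION & SPEC =====
-- Pre_ requires sorted_prefixes to be sorted non-decreasingly — its documented contract is 'sorted[String]'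
-- and bisect's result on an unsorted list is meaningless — and excludes the defensible corner of lists
-- that begin with two (duplicate) empty strings when s has no nonempty prefix in the list: the answer is
-- then a duplicated empty string, and which of the equal empty entries' indices is returned is an accident
-- of A's backward walk (A: index 0, B: the last empty entry's index).
-- (the final disjunct also admits arbitrary, even unsorted, lists no entry of which is a prefix of s:
-- there A can only fall through its loop and both programs return None)
def Pre_get_may_longest_prefix_idx_in_sorted_prefixes (s : String) (sorted_prefixes : List String) : Prop :=
  (List.Pairwise (fun a b => ¬ b.toList < a.toList) sorted_prefixes ∧
  (¬ (2 ≤ sorted_prefixes.length ∧ (sorted_prefixes.getD 0 "").toList = [] ∧ (sorted_prefixes.getD 1 "").toList = []) ∨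
    s.toList = [] ∨ (∃ p ∈ sorted_prefixes, p.toList ≠ [] ∧ PySem.Str.startswith s p = true) ∨
    (∀ p ∈ sorted_prefixes, p.toList ≠ [] → ¬ s < p → p.toList.head? = s.toList.head?))) ∨
  (∀ p ∈ sorted_prefixes, ¬ PySem.Str.startswith s p = true)
instance (s : String) (sorted_prefixes : List String) : Decidable (Pre_get_may_longest_prefix_idx_in_sorted_prefixes s sorted_prefixes) := by unfold Pre_get_may_longest_prefix_idx_in_sorted_prefixes; infer_instance

def pvWitness_get_may_longest_prefix_idx_in_sorted_prefixes : String × List String :=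
  ("23", ["1", "2", "23", "234", "5"])

def Spec_get_may_longest_prefix_idx_in_sorted_prefixes (s : String) (sorted_prefixes : List String) (out : Option Int) : Prop := out = get_may_longest_prefix_idx_in_sorted_prefixes_alt s sorted_prefixes
instance (s : String) (sorted_prefixes : List String) (out : Option Int) : Decidable (Spec_get_may_longest_prefix_idx_in_sorted_prefixes s sorted_prefixes out) := by unfold Spec_get_may_longest_prefix_idx_in_sorted_prefixes; infer_instance

-- ===== CLAIM (what is proved, stated in full; the proofs are below) =====
def Claim_equal_get_may_longest_prefix_idx_in_sorted_prefixes : Prop := ∀ (s : String) (sorted_prefixes : List String), Dom_get_may_longest_prefix_idx_in_sorted_prefixes s sorted_prefixes → Pre_get_may_longest_prefix_idx_in_sorted_prefixes s sorted_prefixes → Spec_get_may_longest_prefix_idx_in_sorted_prefixes s sorted_prefixes (get_may_longest_prefix_idx_in_sorted_prefixes s sorted_prefixes)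

-- ===== LEMMAS AND PROOFS =====

-- reference function: index of the last entry among the first m that is a prefix of s
def pvLp (s : String) (lst : List String) : Nat → Option Int
  | 0 => none
  | i + 1 => if PySem.Str.startswith s (lst.getD i "") then some (i : Int) else pvLp s lst i


theorem pv_pyGet0_list (xs : List Char) : PySem.List.pyGet? xs 0 = xs.head? := by
  cases xs <;> simp [PySem.List.pyGet?, PySem.List.pyIdx?]

theorem pv_pyGet0 (s : String) : PySem.Str.pyGet? s 0 = s.toList.head? := by
  simp [PySem.Str.pyGet?, pv_pyGet0_list]

-- a prefix is never lexicographically greater (list level)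
theorem pv_prefix_not_lt {p s : List Char} (h : p <+: s) : ¬ s < p := by
  induction p generalizing s with
  | nil => exact List.not_lt_nil _
  | cons a p' ih =>
    obtain ⟨t, rfl⟩ := h
    intro hlt
    rcases List.cons_lt_cons_iff.mp hlt with h1 | ⟨-, h2⟩
    · exact lt_irrefl a h1
    · exact ih ⟨t, rfl⟩ h2

-- strings: a prefix is ≤
theorem pv_prefix_le {p s : String} (h : p.toList <+: s.toList) : p ≤ s := by
  refine not_lt.mp ?_
  intro hlt
  exact pv_prefix_not_lt h (String.lt_iff_toList_lt.mp hlt)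

-- strings: p ≤ s, p nonempty, different heads → head p < head s
theorem pv_le_head_lt {p s : String} (hle : p ≤ s) {a : Char} {p' : List Char}
    (hp : p.toList = a :: p') (hne : p.toList.head? ≠ s.toList.head?) :
    ∃ b s', s.toList = b :: s' ∧ a < b := by
  have hns : ¬ s.toList < p.toList := fun h => absurd (String.lt_iff_toList_lt.mpr h) (not_lt.mpr hle)
  cases hs : s.toList with
  | nil => rw [hs, hp] at hns; exact absurd (List.nil_lt_cons _ _) hns
  | cons b s' =>
    rw [hs, hp] at hns hne
    refine ⟨b, s', rfl, ?_⟩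
    rcases lt_trichotomy a b with h | h | h
    · exact h
    · simp [h] at hne
    · exact absurd (List.cons_lt_cons_iff.mpr (Or.inl h)) hns


-- strings: q ≤ p, q nonempty → head q ≤ head p
theorem pv_le_head_le {q p : String} (h : q ≤ p) {a : Char} {q' : List Char}
    (hq : q.toList = a :: q') : ∃ b p', p.toList = b :: p' ∧ a ≤ b := by
  have hns : ¬ p.toList < q.toList := fun hl => absurd (String.lt_iff_toList_lt.mpr hl) (not_lt.mpr h)
  cases hp : p.toList with
  | nil => rw [hp, hq] at hns; exact absurd (List.nil_lt_cons _ _) hns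
  | cons b p' =>
    rw [hp, hq] at hns
    rcases lt_trichotomy a b with h1 | h1 | h1
    · exact ⟨b, p', rfl, le_of_lt h1⟩
    · exact ⟨b, p', rfl, le_of_eq h1⟩
    · exact absurd (List.cons_lt_cons_iff.mpr (Or.inl h1)) hns

-- a nonempty prefix of s starts with s's head
theorem pv_startswith_head {s p : String} {a : Char} {p' : List Char}
    (hp : p.toList = a :: p') (h : PySem.Str.startswith s p = true) :
    s.toList.head? = some a := by
  rw [PySem.Str.startswith_eq, PySem.Chars.startswith_iff, hp] at h
  obtain ⟨t, ht⟩ := h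
  rw [← ht]; rfl

-- monotonicity from pairwise ≤
theorem pv_pw_le {xs : List String} (hs : List.Pairwise (· ≤ ·) xs)
    {i j : Nat} (hij : i ≤ j) (hj : j < xs.length) : xs.getD i "" ≤ xs.getD j "" := by
  rcases eq_or_lt_of_le hij with rfl | h
  · exact le_refl _
  · have := List.pairwise_iff_getElem.mp hs i j (lt_trans h hj) hj h
    rw [List.getD_eq_getElem xs _ (lt_trans h hj), List.getD_eq_getElem xs _ hj]
    exact this

theorem pv_bisect_loop (xs : List String) (x : String)
    (hs : List.Pairwise (· ≤ ·) xs) :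
    ∀ (fuel lo hi : Nat), lo ≤ hi → hi ≤ xs.length → hi - lo ≤ fuel →
    (∀ k (_ : k < xs.length), k < lo → xs.getD k "" ≤ x) →
    (∀ k (_ : k < xs.length), hi ≤ k → x < xs.getD k "") →
    lo ≤ PySem.List.bisectRightLoop xs x fuel lo hi ∧
    PySem.List.bisectRightLoop xs x fuel lo hi ≤ hi ∧
    (∀ k (_ : k < xs.length), k < PySem.List.bisectRightLoop xs x fuel lo hi → xs.getD k "" ≤ x) ∧
    (∀ k (_ : k < xs.length), PySem.List.bisectRightLoop xs x fuel lo hi ≤ k → x < xs.getD k "") := by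
  intro fuel
  induction fuel with
  | zero =>
    intro lo hi hlh hhn hfuel hlow hhigh
    have : lo = hi := by omega
    subst this
    simp only [PySem.List.bisectRightLoop]
    exact ⟨le_refl _, le_refl _, hlow, hhigh⟩
  | succ fuel ih =>
    intro lo hi hlh hhn hfuel hlow hhigh
    rw [PySem.List.bisectRightLoop]
    by_cases hlt : lo < hi
    · simp only [hlt, if_true]
      have hmid : (lo + hi) / 2 < xs.length := by omega
      have hget : xs[(lo + hi) / 2]? = some xs[(lo + hi) / 2] := List.getElem?_eq_getElem hmid
      rw [hget]
      simp only
      by_cases hxy : x < xs[(lo + hi) / 2]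
      · simp only [hxy, if_true]
        have hmhi : (lo + hi) / 2 ≤ hi := by omega
        have hhigh' : ∀ k (_ : k < xs.length), (lo + hi) / 2 ≤ k → x < xs.getD k "" := by
          intro k hk hmk
          calc x < xs[(lo + hi) / 2] := hxy
            _ ≤ xs.getD k "" := by
                rw [← List.getD_eq_getElem xs "" hmid]; exact pv_pw_le hs hmk hk
        obtain ⟨r1, r2, r3, r4⟩ := ih lo ((lo + hi) / 2) (by omega) (by omega) (by omega) hlow hhigh'
        exact ⟨r1, by omega, r3, r4⟩
      · simp only [hxy, if_false]
        have hlow' : ∀ k (_ : k < xs.length), k < (lo + hi) / 2 + 1 → xs.getD k "" ≤ x := by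
          intro k hk hkm
          have h2 : xs.getD k "" ≤ xs.getD ((lo + hi) / 2) "" := pv_pw_le hs (by omega) hmid
          rw [List.getD_eq_getElem xs "" hmid] at h2
          exact le_trans h2 (not_lt.mp hxy)
        obtain ⟨r1, r2, r3, r4⟩ := ih ((lo + hi) / 2 + 1) hi (by omega) hhn (by omega) hlow' hhigh
        exact ⟨by omega, r2, r3, r4⟩
    · simp only [hlt, if_false]
      have : lo = hi := by omega
      subst this
      exact ⟨le_refl _, le_refl _, hlow, hhigh⟩

theorem pv_lp_drop (s : String) (lst : List String) (j : Nat) :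
    ∀ m, j ≤ m →
    (∀ k, j ≤ k → k < m → ¬ PySem.Str.startswith s (lst.getD k "") = true) →
    pvLp s lst m = pvLp s lst j := by
  intro m
  induction m with
  | zero =>
    intro hj _
    have : j = 0 := by omega
    rw [this]
  | succ m ih =>
    intro hj hnm
    rcases Nat.eq_or_lt_of_le hj with rfl | h
    · rfl
    · have hm : j ≤ m := by omega
      rw [pvLp]
      rw [if_neg (hnm m hm (by omega))]
      exact ih hm (fun k hk hkm => hnm k hk (by omega))


-- pvLp yields a matching index below m
theorem pv_lp_some (s : String) (lst : List String) :
    ∀ m i, pvLp s lst m = some i →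
    ∃ k : Nat, i = (k : Int) ∧ k < m ∧ PySem.Str.startswith s (lst.getD k "") = true := by
  intro m
  induction m with
  | zero => intro i h; simp [pvLp] at h
  | succ m ih =>
    intro i h
    rw [pvLp] at h
    by_cases hc : PySem.Str.startswith s (lst.getD m "") = true
    · rw [if_pos hc] at h
      exact ⟨m, (Option.some_inj.mp h).symm, by omega, hc⟩
    · rw [if_neg hc] at h
      obtain ⟨k, hk1, hk2, hk3⟩ := ih i h
      exact ⟨k, hk1, by omega, hk3⟩

-- the index pvLp yields is the last matching one
theorem pv_lp_max (s : String) (lst : List String) :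
    ∀ m (i : Nat), pvLp s lst m = some (i : Int) →
    ∀ k, i < k → k < m → ¬ PySem.Str.startswith s (lst.getD k "") = true := by
  intro m
  induction m with
  | zero => intro i h; simp [pvLp] at h
  | succ m ih =>
    intro i h k hik hkm
    rw [pvLp] at h
    by_cases hc : PySem.Str.startswith s (lst.getD m "") = true
    · rw [if_pos hc] at h
      have : (m : Int) = (i : Int) := Option.some_inj.mp h
      omega
    · rw [if_neg hc] at h
      rcases Nat.lt_or_ge k m with hk | hk
      · exact ih i h k hik hk
      · have : k = m := by omega
        rwa [this]

-- if pvLp finds nothing, nothing below m matches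
theorem pv_lp_none (s : String) (lst : List String) :
    ∀ m, pvLp s lst m = none →
    ∀ k, k < m → ¬ PySem.Str.startswith s (lst.getD k "") = true := by
  intro m
  induction m with
  | zero => intro _ k hk; omega
  | succ m ih =>
    intro h k hkm
    rw [pvLp] at h
    by_cases hc : PySem.Str.startswith s (lst.getD m "") = true
    · rw [if_pos hc] at h; exact absurd h (by simp)
    · rw [if_neg hc] at h
      rcases Nat.lt_or_ge k m with hk | hk
      · exact ih h k hk
      · have : k = m := by omega
        rwa [this]

-- an entry ≤ "" is empty
theorem pv_le_empty {t : String} (h : t ≤ "") : t.toList = [] := by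
  cases hx : t.toList with
  | nil => rfl
  | cons c u =>
    have : ("" : String) < t := String.lt_iff_toList_lt.mpr (by rw [hx]; exact List.nil_lt_cons _ _)
    exact absurd this (not_lt.mpr h)

theorem pv_bisect_spec (xs : List String) (x : String) (hs : List.Pairwise (· ≤ ·) xs) :
    PySem.List.bisectRight xs x ≤ xs.length ∧
    (∀ k (_ : k < xs.length), k < PySem.List.bisectRight xs x → xs.getD k "" ≤ x) ∧
    (∀ k (_ : k < xs.length), PySem.List.bisectRight xs x ≤ k → x < xs.getD k "") := by
  have h := pv_bisect_loop xs x hs xs.length 0 xs.length (Nat.zero_le _) (le_refl _)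
    (by omega) (by intro k _ hk; omega) (by intro k hk hle; omega)
  exact ⟨h.2.1, h.2.2.1, h.2.2.2⟩

-- strictly below a break point, only the empty string (at index 0) can match
theorem pv_break (s : String) (lst : List String)
    (hs : List.Pairwise (· ≤ ·) lst)
    (hcorner : ¬ (2 ≤ lst.length ∧ (lst.getD 0 "").toList = [] ∧ (lst.getD 1 "").toList = []))
    {i : Nat} (hi : i < lst.length)
    (hle : lst.getD i "" ≤ s)
    (hnsw : ¬ PySem.Str.startswith s (lst.getD i "") = true)
    (hhd : PySem.Str.pyGet? s 0 ≠ PySem.Str.pyGet? (lst.getD i "") 0) :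
    pvLp s lst i = (if lst.getD 0 "" = "" then some 0 else none) := by
  -- the break prefix is nonempty ("" would have matched)
  have hne : lst.getD i "" ≠ "" := by
    intro h; rw [h] at hnsw
    exact hnsw (by rw [PySem.Str.startswith_eq, PySem.Chars.startswith_iff]; exact List.nil_prefix)
  obtain ⟨a, p', hp⟩ : ∃ a p', (lst.getD i "").toList = a :: p' := by
    cases h : (lst.getD i "").toList with
    | nil => exact absurd (String.toList_eq_nil_iff.mp h) hne
    | cons a p' => exact ⟨a, p', rfl⟩
  have hhd' : (lst.getD i "").toList.head? ≠ s.toList.head? := by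
    rw [pv_pyGet0, pv_pyGet0] at hhd; exact fun h => hhd h.symm
  obtain ⟨b, s', hsl, hab⟩ := pv_le_head_lt hle hp hhd'
  -- any nonempty entry below index i starts with a char < head of s
  have hbelow : ∀ k, k < i → ¬ PySem.Str.startswith s (lst.getD k "") = true ∨ lst.getD k "" = "" := by
    intro k hk
    by_cases hk0 : lst.getD k "" = ""
    · exact Or.inr hk0
    · left
      obtain ⟨c, q', hq⟩ : ∃ c q', (lst.getD k "").toList = c :: q' := by
        cases h : (lst.getD k "").toList with
        | nil => exact absurd (String.toList_eq_nil_iff.mp h) hk0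
        | cons c q' => exact ⟨c, q', rfl⟩
      have hqp : lst.getD k "" ≤ lst.getD i "" := pv_pw_le hs (le_of_lt hk) hi
      obtain ⟨a2, p2, hp2, hca⟩ := pv_le_head_le hqp hq
      have ha2 : a2 = a := by rw [hp2] at hp; exact (List.cons.injEq .. ▸ hp).1
      intro hsw
      have := pv_startswith_head hq hsw
      rw [hsl] at this
      have hcb : b = c := by simpa using this
      have hlt2 : c < b := lt_of_le_of_lt (ha2 ▸ hca) hab
      exact lt_irrefl c (hcb ▸ hlt2)
  -- a ≤-sorted list admitted by Pre_ has empty entries only at index 0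
  have hempty0 : ∀ k, 0 < k → k < lst.length → lst.getD k "" ≠ "" := by
    intro k hk0 hkn h
    have h1 : lst.getD 1 "" ≤ lst.getD k "" := pv_pw_le hs hk0 hkn
    rw [h] at h1
    have h1nil : (lst.getD 1 "").toList = [] := by
      cases hx : (lst.getD 1 "").toList with
      | nil => rfl
      | cons c t =>
        have : ("" : String) < lst.getD 1 "" :=
          String.lt_iff_toList_lt.mpr (by rw [hx]; exact List.nil_lt_cons _ _)
        exact absurd this (not_lt.mpr h1)
    have h0 : lst.getD 0 "" ≤ lst.getD 1 "" := pv_pw_le hs (by omega) (by omega)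
    have h0nil : (lst.getD 0 "").toList = [] := by
      cases hx : (lst.getD 0 "").toList with
      | nil => rfl
      | cons c t =>
        have : lst.getD 1 "" < lst.getD 0 "" :=
          String.lt_iff_toList_lt.mpr (by rw [hx, h1nil]; exact List.nil_lt_cons _ _)
        exact absurd this (not_lt.mpr h0)
    exact hcorner ⟨by omega, h0nil, h1nil⟩
  rcases Nat.eq_zero_or_pos i with rfl | hipos
  · rw [pvLp, if_neg hne]
  · have hstep : pvLp s lst i = pvLp s lst 1 := by
      apply pv_lp_drop s lst 1 i hipos
      intro k hk1 hki
      rcases hbelow k hki with h | h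
      · exact h
      · exact absurd h (hempty0 k (by omega) (by omega))
    rw [hstep, pvLp]
    by_cases h0 : lst.getD 0 "" = ""
    · rw [if_pos (by rw [h0, PySem.Str.startswith_eq, PySem.Chars.startswith_iff]; exact List.nil_prefix),
          if_pos h0]
      rfl
    · rcases hbelow 0 hipos with h | h
      · rw [if_neg h, if_neg h0]
        rfl
      · exact absurd h h0

-- the A loop agrees with pvLp up to the bisect point
theorem pv_loopA_eq_lp (s : String) (lst : List String)
    (hs : List.Pairwise (· ≤ ·) lst)
    (hcorner : ¬ (2 ≤ lst.length ∧ (lst.getD 0 "").toList = [] ∧ (lst.getD 1 "").toList = [])) :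
    ∀ i, i ≤ PySem.List.bisectRight lst s → pvLoopA s lst i = pvLp s lst i := by
  obtain ⟨hb1, hb2, hb3⟩ := pv_bisect_spec lst s hs
  intro i
  induction i with
  | zero => intro _; rfl
  | succ i ih =>
    intro hib
    rw [pvLoopA, pvLp]
    by_cases hsw : PySem.Str.startswith s (lst.getD i "") = true
    · rw [if_pos hsw, if_pos hsw]
    · rw [if_neg hsw, if_neg hsw]
      by_cases hhd : PySem.Str.pyGet? s 0 ≠ PySem.Str.pyGet? (lst.getD i "") 0
      · rw [if_pos hhd]
        exact (pv_break s lst hs hcorner (by omega) (hb2 i (by omega) (by omega)) hsw hhd).symm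
      · rw [if_neg hhd]
        exact ih (by omega)

-- above the last nonempty matching index the A loop never breaks
theorem pv_loopA_above (s : String) (lst : List String)
    (hs : List.Pairwise (· ≤ ·) lst) {m : Nat} (hmn : m < lst.length)
    (hmsw : PySem.Str.startswith s (lst.getD m "") = true)
    {a : Char} {p' : List Char} (hmp : (lst.getD m "").toList = a :: p') :
    ∀ i, m < i → i ≤ PySem.List.bisectRight lst s → pvLoopA s lst i = pvLp s lst i := by
  obtain ⟨hb1, hb2, hb3⟩ := pv_bisect_spec lst s hs
  intro i
  induction i with
  | zero => intro h _; omega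
  | succ i ih =>
    intro hmi hib
    rw [pvLoopA, pvLp]
    by_cases hsw : PySem.Str.startswith s (lst.getD i "") = true
    · rw [if_pos hsw, if_pos hsw]
    · rw [if_neg hsw, if_neg hsw]
      have hmi' : m < i := by
        rcases Nat.lt_or_ge m i with h | h
        · exact h
        · have : m = i := by omega
          rw [this] at hmsw
          exact absurd hmsw hsw
      by_cases hhd : PySem.Str.pyGet? s 0 ≠ PySem.Str.pyGet? (lst.getD i "") 0
      · -- a break above the nonempty match m is impossible
        exfalso
        have hin : i < lst.length := by omega
        have hile : lst.getD i "" ≤ s := hb2 i hin (by omega)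
        have hine : lst.getD i "" ≠ "" := by
          intro h; rw [h] at hsw
          exact hsw (by rw [PySem.Str.startswith_eq, PySem.Chars.startswith_iff]; exact List.nil_prefix)
        obtain ⟨c, q', hq⟩ : ∃ c q', (lst.getD i "").toList = c :: q' := by
          cases h : (lst.getD i "").toList with
          | nil => exact absurd (String.toList_eq_nil_iff.mp h) hine
          | cons c q' => exact ⟨c, q', rfl⟩
        have hhd' : (lst.getD i "").toList.head? ≠ s.toList.head? := by
          rw [pv_pyGet0, pv_pyGet0] at hhd; exact fun h => hhd h.symm
        obtain ⟨b, s', hsl, hcb⟩ := pv_le_head_lt hile hq hhd'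
        have hshead : s.toList.head? = some a := pv_startswith_head hmp hmsw
        have hba : b = a := by rw [hsl] at hshead; simpa using hshead
        have hmle : lst.getD m "" ≤ lst.getD i "" := pv_pw_le hs (le_of_lt hmi') hin
        obtain ⟨c2, q2, hq2, hac⟩ := pv_le_head_le hmle hmp
        have hc2 : c2 = c := by rw [hq2] at hq; exact (List.cons.injEq .. ▸ hq).1
        -- a ≤ c < b = a
        have : a < a := lt_of_le_of_lt (hc2 ▸ hac) (hba ▸ hcb)
        exact lt_irrefl a this
      · rw [if_neg hhd]
        exact ih hmi' (by omega)

-- when every nonempty entry ≤ s shares s's first character, the A loop never breaks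
theorem pv_loopA_nobreak (s : String) (lst : List String)
    (hs : List.Pairwise (· ≤ ·) lst)
    (hC4 : ∀ p ∈ lst, p.toList ≠ [] → ¬ s < p → p.toList.head? = s.toList.head?) :
    ∀ i, i ≤ PySem.List.bisectRight lst s → pvLoopA s lst i = pvLp s lst i := by
  obtain ⟨hb1, hb2, hb3⟩ := pv_bisect_spec lst s hs
  intro i
  induction i with
  | zero => intro _; rfl
  | succ i ih =>
    intro hib
    rw [pvLoopA, pvLp]
    by_cases hsw : PySem.Str.startswith s (lst.getD i "") = true
    · rw [if_pos hsw, if_pos hsw]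
    · rw [if_neg hsw, if_neg hsw]
      by_cases hhd : PySem.Str.pyGet? s 0 ≠ PySem.Str.pyGet? (lst.getD i "") 0
      · exfalso
        have hin : i < lst.length := by omega
        have hile : lst.getD i "" ≤ s := hb2 i hin (by omega)
        have hine : (lst.getD i "").toList ≠ [] := by
          intro h
          exact hsw (by rw [PySem.Str.startswith_eq, PySem.Chars.startswith_iff, h]; exact List.nil_prefix)
        have hmem : lst.getD i "" ∈ lst := by
          rw [List.getD_eq_getElem lst "" hin]; exact List.getElem_mem hin
        have := hC4 (lst.getD i "") hmem hine (not_lt.mpr hile)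
        rw [pv_pyGet0, pv_pyGet0] at hhd
        exact hhd this.symm
      · rw [if_neg hhd]
        exact ih (by omega)

-- A computes pvLp over the whole list
theorem pv_A_eq_lp (s : String) (lst : List String)
    (hs : List.Pairwise (· ≤ ·) lst)
    (hcase : ¬ (2 ≤ lst.length ∧ (lst.getD 0 "").toList = [] ∧ (lst.getD 1 "").toList = []) ∨
      s.toList = [] ∨ (∃ p ∈ lst, p.toList ≠ [] ∧ PySem.Str.startswith s p = true) ∨
      (∀ p ∈ lst, p.toList ≠ [] → ¬ s < p → p.toList.head? = s.toList.head?)) :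
    get_may_longest_prefix_idx_in_sorted_prefixes s lst = pvLp s lst lst.length := by
  obtain ⟨hb1, hb2, hb3⟩ := pv_bisect_spec lst s hs
  unfold get_may_longest_prefix_idx_in_sorted_prefixes
  have hdrop : pvLp s lst lst.length = pvLp s lst (PySem.List.bisectRight lst s) := by
    refine pv_lp_drop s lst (PySem.List.bisectRight lst s) lst.length hb1 ?_
    intro k hk hkn hsw
    have hpre : (lst.getD k "").toList <+: s.toList := by
      rwa [PySem.Str.startswith_eq, PySem.Chars.startswith_iff] at hsw
    exact absurd (pv_prefix_le hpre) (not_le.mpr (hb3 k hkn hk))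
  rw [hdrop]
  rcases hcase with hcorner | hscase
  · exact pv_loopA_eq_lp s lst hs hcorner _ (le_refl _)
  rcases hscase with hnil | hex | hC4
  · -- s = "": the first examined entry is ≤ "" hence "", and matches at once
    cases hj : PySem.List.bisectRight lst s with
    | zero => rfl
    | succ t =>
      have htn : t < lst.length := by omega
      have htle : lst.getD t "" ≤ s := hb2 t htn (by omega)
      have hsempty : s = "" := String.toList_eq_nil_iff.mp hnil
      have htempty : (lst.getD t "").toList = [] := pv_le_empty (hsempty ▸ htle)
      have hmatch : PySem.Str.startswith s (lst.getD t "") = true := by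
        rw [PySem.Str.startswith_eq, PySem.Chars.startswith_iff, htempty]
        exact List.nil_prefix
      rw [pvLoopA, pvLp, if_pos hmatch, if_pos hmatch]
  · -- some nonempty entry is a prefix of s: the loop matches before it could break
    obtain ⟨p, hpmem, hpne, hpsw⟩ := hex
    obtain ⟨k, hkn, rfl⟩ := List.mem_iff_getElem.mp hpmem
    rw [← List.getD_eq_getElem lst "" hkn] at hpne hpsw
    -- pvLp over the whole list finds a (last) match
    have hlpn : pvLp s lst lst.length ≠ none := by
      intro h
      exact pv_lp_none s lst lst.length h k hkn hpsw
    obtain ⟨iv, hiv⟩ := Option.ne_none_iff_exists'.mp hlpn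
    obtain ⟨m, rfl, hmn, hmsw⟩ := pv_lp_some s lst lst.length iv hiv
    have hmmax := pv_lp_max s lst lst.length m hiv
    -- the last match is at or after k, hence nonempty
    have hkm : k ≤ m := by
      by_contra hcon
      exact hmmax k (by omega) hkn hpsw
    have hmne : (lst.getD m "").toList ≠ [] := by
      intro hnilm
      have hle2 : lst.getD k "" ≤ lst.getD m "" := pv_pw_le hs hkm hmn
      have : (lst.getD k "").toList = [] := by
        refine pv_le_empty ?_
        rwa [String.toList_eq_nil_iff.mp hnilm] at hle2
      exact hpne this
    obtain ⟨a, p', hmp⟩ : ∃ a p', (lst.getD m "").toList = a :: p' := by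
      cases h : (lst.getD m "").toList with
      | nil => exact absurd h hmne
      | cons a p' => exact ⟨a, p', rfl⟩
    -- the last match sits below the bisect point
    have hmj : m < PySem.List.bisectRight lst s := by
      by_contra hcon
      have : s < lst.getD m "" := hb3 m hmn (by omega)
      have hple : lst.getD m "" ≤ s := pv_prefix_le (by
        rwa [PySem.Str.startswith_eq, PySem.Chars.startswith_iff] at hmsw)
      exact absurd hple (not_le.mpr this)
    exact pv_loopA_above s lst hs hmn hmsw hmp _ hmj (le_refl _)
  · -- every nonempty entry ≤ s starts with s's head: the walk never breaks
    exact pv_loopA_nobreak s lst hs hC4 _ (le_refl _)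

-- the fold of B over the first m entries, characterized by pvLp
theorem pv_fold (s : String) (lst : List String) (hs : List.Pairwise (· ≤ ·) lst) :
    ∀ m, m ≤ lst.length →
    (pvLp s lst m = none ∧
      ((PySem.List.enumerate (lst.take m) 0).foldl
        (fun (st : Option Int × Int) ip =>
          if PySem.Str.startswith s ip.2 = true ∧ st.2 ≤ PySem.Str.len ip.2 then (some ip.1, PySem.Str.len ip.2) else st)
        (none, -1)) = (none, -1)) ∨
    (∃ k : Nat, k < m ∧ PySem.Str.startswith s (lst.getD k "") = true ∧
      pvLp s lst m = some (k : Int) ∧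
      ((PySem.List.enumerate (lst.take m) 0).foldl
        (fun (st : Option Int × Int) ip =>
          if PySem.Str.startswith s ip.2 = true ∧ st.2 ≤ PySem.Str.len ip.2 then (some ip.1, PySem.Str.len ip.2) else st)
        (none, -1)) = (some (k : Int), PySem.Str.len (lst.getD k ""))) := by
  intro m
  induction m with
  | zero => intro _; left; exact ⟨rfl, rfl⟩
  | succ m ih =>
    intro hm
    have hmn : m < lst.length := by omega
    have htake : lst.take (m + 1) = lst.take m ++ [lst.getD m ""] := by
      rw [List.take_succ, List.getElem?_eq_getElem hmn, List.getD_eq_getElem lst "" hmn]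
      rfl
    have hlen : (lst.take m).length = m := by
      rw [List.length_take]; omega
    rw [htake, PySem.List.enumerate_append, List.foldl_append]
    rw [hlen]
    simp only [zero_add]
    by_cases hsw : PySem.Str.startswith s (lst.getD m "") = true
    · right
      refine ⟨m, by omega, hsw, ?_, ?_⟩
      · rw [pvLp, if_pos hsw]
      · rcases ih (by omega) with ⟨_, hfold⟩ | ⟨k, hk, hswk, _, hfold⟩
        · rw [hfold]
          simp only [PySem.List.enumerate, List.foldl]
          rw [if_pos ⟨hsw, by rw [PySem.Str.len_eq]; omega⟩]
        · rw [hfold]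
          simp only [PySem.List.enumerate, List.foldl]
          -- sorted prefixes of s have non-decreasing lengths
          have hgrow : (PySem.Str.len (lst.getD k "")) ≤ PySem.Str.len (lst.getD m "") := by
            have hkm : lst.getD k "" ≤ lst.getD m "" := pv_pw_le hs (le_of_lt hk) hmn
            have hpk : (lst.getD k "").toList <+: s.toList := by
              rwa [PySem.Str.startswith_eq, PySem.Chars.startswith_iff] at hswk
            have hpm : (lst.getD m "").toList <+: s.toList := by
              rwa [PySem.Str.startswith_eq, PySem.Chars.startswith_iff] at hsw
            have hlt : (lst.getD k "").toList.length ≤ (lst.getD m "").toList.length := by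
              by_contra hcon
              have hmk := List.prefix_of_prefix_length_le hpm hpk (by omega)
              have heq : lst.getD m "" = lst.getD k "" := le_antisymm (pv_prefix_le hmk) hkm
              rw [heq] at hcon
              omega
            rw [PySem.Str.len_eq, PySem.Str.len_eq]
            exact_mod_cast hlt
          rw [if_pos ⟨hsw, hgrow⟩]
    · rw [pvLp, if_neg hsw]
      have hstep : ∀ st : Option Int × Int,
          (PySem.List.enumerate [lst.getD m ""] (m : Int)).foldl
            (fun (st : Option Int × Int) ip =>
              if PySem.Str.startswith s ip.2 = true ∧ st.2 ≤ PySem.Str.len ip.2 then (some ip.1, PySem.Str.len ip.2) else st)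
            st = st := by
        intro st
        simp only [PySem.List.enumerate, List.foldl]
        rw [if_neg (fun h => hsw h.1)]
      rcases ih (by omega) with ⟨hlp, hfold⟩ | ⟨k, hk, hswk, hlp, hfold⟩
      · left; rw [hfold, hstep]; exact ⟨hlp, rfl⟩
      · right; exact ⟨k, by omega, hswk, hlp, by rw [hfold, hstep]⟩

-- B computes pvLp over the whole list
theorem pv_B_eq_lp (s : String) (lst : List String) (hs : List.Pairwise (· ≤ ·) lst) :
    get_may_longest_prefix_idx_in_sorted_prefixes_alt s lst = pvLp s lst lst.length := by
  unfold get_may_longest_prefix_idx_in_sorted_prefixes_alt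
  have := pv_fold s lst hs lst.length (le_refl _)
  rw [List.take_length] at this
  rcases this with ⟨hlp, hfold⟩ | ⟨k, _, _, hlp, hfold⟩
  · rw [hfold, hlp]
  · rw [hfold, hlp]
-- the bisect loop never exceeds hi (no sortedness needed)
theorem pv_bisect_loop_le (xs : List String) (x : String) :
    ∀ (fuel lo hi : Nat), lo ≤ hi → PySem.List.bisectRightLoop xs x fuel lo hi ≤ hi := by
  intro fuel
  induction fuel with
  | zero => intro lo hi h; rw [PySem.List.bisectRightLoop]; exact h
  | succ fuel ih =>
    intro lo hi hlh
    rw [PySem.List.bisectRightLoop]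
    by_cases hlt : lo < hi
    · simp only [hlt, if_true]
      cases hget : xs[(lo + hi) / 2]? with
      | none => exact hlh
      | some y =>
        simp only
        by_cases hxy : x < y
        · simp only [hxy, if_true]
          exact le_trans (ih lo ((lo + hi) / 2) (by omega)) (by omega)
        · simp only [hxy, if_false]
          exact ih ((lo + hi) / 2 + 1) hi (by omega)
    · simp only [hlt, if_false]
      exact hlh

-- when nothing in the list is a prefix of s, the A loop falls through to None
theorem pv_loopA_none (s : String) (lst : List String)
    (hno : ∀ p ∈ lst, ¬ PySem.Str.startswith s p = true) :
    ∀ i, i ≤ lst.length → pvLoopA s lst i = none := by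
  intro i
  induction i with
  | zero => intro _; rfl
  | succ i ih =>
    intro hin
    have hi : i < lst.length := by omega
    have hmem : lst.getD i "" ∈ lst := by
      rw [List.getD_eq_getElem lst "" hi]; exact List.getElem_mem hi
    rw [pvLoopA, if_neg (hno _ hmem)]
    have h0 : lst.getD 0 "" ≠ "" := by
      intro h
      have hmem0 : lst.getD 0 "" ∈ lst := by
        rw [List.getD_eq_getElem lst "" (by omega)]; exact List.getElem_mem (by omega)
      refine hno _ hmem0 ?_
      rw [h, PySem.Str.startswith_eq, PySem.Chars.startswith_iff]
      exact List.nil_prefix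
    by_cases hhd : PySem.Str.pyGet? s 0 ≠ PySem.Str.pyGet? (lst.getD i "") 0
    · rw [if_pos hhd, if_neg h0]
    · rw [if_neg hhd]
      exact ih (by omega)

-- a fold whose step never fires is the identity
theorem pv_fold_id (s : String) (l : List (Int × String))
    (hno : ∀ ip ∈ l, ¬ PySem.Str.startswith s ip.2 = true) (st : Option Int × Int) :
    l.foldl
      (fun (st : Option Int × Int) ip =>
        if PySem.Str.startswith s ip.2 = true ∧ st.2 ≤ PySem.Str.len ip.2 then (some ip.1, PySem.Str.len ip.2) else st)
      st = st := by
  induction l generalizing st with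
  | nil => rfl
  | cons ip l ih =>
    rw [List.foldl_cons, if_neg (fun h => hno ip List.mem_cons_self h.1)]
    exact ih (fun q hq => hno q (List.mem_cons_of_mem _ hq)) st

-- when nothing in the list is a prefix of s, both programs return none
theorem pv_no_prefix (s : String) (lst : List String)
    (hno : ∀ p ∈ lst, ¬ PySem.Str.startswith s p = true) :
    get_may_longest_prefix_idx_in_sorted_prefixes s lst = none ∧
    get_may_longest_prefix_idx_in_sorted_prefixes_alt s lst = none := by
  constructor
  · unfold get_may_longest_prefix_idx_in_sorted_prefixes
    refine pv_loopA_none s lst hno _ ?_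
    unfold PySem.List.bisectRight
    exact pv_bisect_loop_le lst s _ _ _ (by omega)
  · unfold get_may_longest_prefix_idx_in_sorted_prefixes_alt
    rw [pv_fold_id s _ ?_ (none, -1)]
    intro ip hip hsw
    have hmem : ip.2 ∈ lst := by
      have := List.mem_map_of_mem (f := Prod.snd) hip
      rwa [PySem.List.map_snd_enumerate] at this
    exact hno ip.2 hmem hsw

-- ===== VERDICT (by name: the statement is the Claim_ definition above) =====
theorem get_may_longest_prefix_idx_in_sorted_prefixes_spec : Claim_equal_get_may_longest_prefix_idx_in_sorted_prefixes := by
  intro s lst _ hpre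
  unfold Spec_get_may_longest_prefix_idx_in_sorted_prefixes
  rcases hpre with ⟨hsorted, hcorner⟩ | hgt
  · have hs : List.Pairwise (· ≤ ·) lst :=
      List.Pairwise.imp (fun h => not_lt.mp (fun hlt => h (String.lt_iff_toList_lt.mp hlt))) hsorted
    rw [pv_A_eq_lp s lst hs hcorner, pv_B_eq_lp s lst hs]
  · obtain ⟨hA, hB⟩ := pv_no_prefix s lst hgt
    rw [hA, hB]
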